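-- pv_equiv track=rewrite | github.com/smohapatra1/scripting | python/practice/start_again/2024/04162024/stone_game.py | calcbit
-- ===== SOURCE A (Python) =====
-- modulus = int(1e9 + 7)
--
-- def prodsums(arr):
--     n = len(arr)+1
--     s = [[0 for i in range(n)] for j in range(n)]
--     s[0][0] = 1
--     for i in range(1,n):
--         s[i][0] = 1
--         for j in range(1,n):
--             s[i][j] = (s[i-1][j] + arr[i-1] * s[i-1][j-1]) % modulus
--     return [s[n-1][j] for j in range(n)]
--
-- def calcbit(piles, xorpiles, k):
--     if xorpiles >> (k+1):
--         return 0
--     m = (1 << k) - 1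
--     evens = [p & m for p in piles if ((p >> k) & 1) == 0]
--     odds = [p & m for p in piles if (p >> k) & 1]
--     osz = len(odds)
--     if osz == 0:
--         return 0
--     psum = prodsums(odds)
--     b = 1
--     for e in evens:
--         b *= e
--     s = 0
--     for sz in range(0, osz, 2):
--         pw = (1 << (k * (osz - sz - 1))) % modulus
--         s += pw * psum[sz]
--     return (b * s) % modulus
-- ===== SOURCE B (Python) =====
-- modulus = int(1e9 + 7)
--
-- def _mulmod(p, q):
--     # schoolbook product of two polynomials in ascending-power coefficients, mod modulus
--     return [sum(p[i] * q[idx - i] for i in range(len(p)) if 0 <= idx - i < len(q)) % modulus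
--             for idx in range(len(p) + len(q) - 1)]
--
-- def _poly(arr, lo, hi):
--     # coefficient list [e_0, e_1, ...] (e_j = j-th elementary symmetric sum) of prod_{lo<=i<hi} (x + arr[i]), mod modulus
--     if hi - lo == 1:
--         return [1, arr[lo] % modulus]
--     mid = (lo + hi) // 2
--     return _mulmod(_poly(arr, lo, mid), _poly(arr, mid, hi))
--
-- def calcbit(piles, xorpiles, k):
--     if xorpiles >> (k + 1):
--         return 0
--     mask = (1 << k) - 1
--     b = 1
--     odds = []
--     for p in piles:
--         if (p >> k) & 1:
--             odds.append(p & mask)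
--         else:
--             b = b * (p & mask) % modulus
--     osz = len(odds)
--     if osz == 0:
--         return 0
--     psum = _poly(odds, 0, osz)
--     pw = 1 if osz % 2 else pow(2, k, modulus)
--     step = pow(4, k, modulus)
--     s = 0
--     for sz in range(2 * ((osz - 1) // 2), -1, -2):
--         s += pw * psum[sz]
--         pw = pw * step % modulus
--     return b * s % modulus
-- ===== Notes on version B (the rewrite author's own statement) =====
-- stated objective: alternative
-- what changed: prodsums's (n+1)x(n+1) DP table is replaced by a divide-and-conquer product of the polynomials (x+a) with schoolbook mod-convolution, the two filter passes over piles are fused into one partitioning pass that keeps the evens product reduced mod 1e9+7, and the per-term exact power (1 << k*(osz-sz-1)) is replaced by a modular power maintained multiplicatively over a descending loop.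
import Mathlib
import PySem

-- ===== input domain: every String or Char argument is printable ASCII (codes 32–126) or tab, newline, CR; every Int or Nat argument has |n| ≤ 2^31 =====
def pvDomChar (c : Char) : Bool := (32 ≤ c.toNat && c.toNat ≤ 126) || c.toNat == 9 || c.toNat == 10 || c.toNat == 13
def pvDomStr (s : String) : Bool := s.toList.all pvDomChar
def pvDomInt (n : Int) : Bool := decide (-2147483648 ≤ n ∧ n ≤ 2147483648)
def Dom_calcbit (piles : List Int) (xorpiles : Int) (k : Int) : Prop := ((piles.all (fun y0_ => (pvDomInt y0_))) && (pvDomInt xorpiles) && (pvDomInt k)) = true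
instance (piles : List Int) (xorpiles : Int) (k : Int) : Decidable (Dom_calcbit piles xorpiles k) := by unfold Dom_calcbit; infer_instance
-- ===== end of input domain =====

-- B replaces A's (n+1)x(n+1)-table DP by a divide-and-conquer polynomial product, fuses
-- A's two filter passes into one partitioning pass, and replaces A's per-term exact shift
-- (1 << e) % modulus by a multiplicatively maintained modular power over a descending loop;
-- same return value on every input admitted by Pre_calcbit.
-- Python '% modulus' with the positive literal modulus 10^9+7 is Int.emod — exact here.

-- ===== PORT A =====
-- prodsums: A fills an n×n table row by row, each row from the previous one; the port
-- keeps exactly that recurrence s[i][j] = (s[i-1][j] + arr[i-1]*s[i-1][j-1]) % modulus,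
-- carrying the current row (row i sees only row i-1) and returning the last row.
def rowStepA (a : Int) (prev : List Int) : List Int :=
  1 :: List.zipWith (fun p0 p1 => (p1 + a * p0) % 1000000007) prev (prev.drop 1)

def prodsumsA (arr : List Int) : List Int :=
  arr.foldl (fun prev a => rowStepA a prev) (1 :: List.replicate arr.length 0)

def calcbit (piles : List Int) (xorpiles : Int) (k : Int) : Int :=
  if xorpiles >>> (k + 1).toNat ≠ 0 then 0
  else
    let m : Int := ((1 : Int) <<< k.toNat) - 1
    let evens := (piles.filter (fun (p : Int) => PySem.Int.band (p >>> k.toNat) 1 == 0)).map (fun p => PySem.Int.band p m)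
    let odds := (piles.filter (fun (p : Int) => PySem.Int.band (p >>> k.toNat) 1 != 0)).map (fun p => PySem.Int.band p m)
    let osz : Int := odds.length
    if osz = 0 then 0
    else
      let psum := prodsumsA odds
      let b := evens.foldl (fun b e => b * e) 1
      let s := (PySem.List.pyRange 0 osz 2).foldl (fun s sz =>
        s + (((1 : Int) <<< (k * (osz - sz - 1)).toNat) % 1000000007) * PySem.List.pyGetD psum sz 0) 0
      (b * s) % 1000000007

-- ===== PORT B =====
-- _mulmod: sum(... for i in range(len(p)) if 0 <= idx-i < len(q)) is the sum of the
-- guarded terms, ported as a sum of if-then-else-0 terms over the same range.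
def mulmodB (p q : List Int) : List Int :=
  (List.range (p.length + q.length - 1)).map (fun idx =>
    (((List.range p.length).map (fun i =>
      if i ≤ idx ∧ idx - i < q.length then p.getD i 0 * q.getD (idx - i) 0 else 0)).sum) % 1000000007)

-- _poly: the base-case test 'hi - lo == 1' is 'hi ≤ lo + 1' here so the recursion is
-- total (Python recurses forever on an empty slice; all call sites have lo < hi).
def polyB (arr : List Int) (lo hi : Nat) : List Int :=
  if h : hi ≤ lo + 1 then [1, arr.getD lo 0 % 1000000007]
  else mulmodB (polyB arr lo ((lo + hi) / 2)) (polyB arr ((lo + hi) / 2) hi)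
termination_by hi - lo
decreasing_by all_goals omega

def calcbit_alt (piles : List Int) (xorpiles : Int) (k : Int) : Int :=
  if xorpiles >>> (k + 1).toNat ≠ 0 then 0
  else
    let mask : Int := ((1 : Int) <<< k.toNat) - 1
    -- one pass: multiply evens into b, append odds
    let st := piles.foldl (fun (st : Int × List Int) (p : Int) =>
      if PySem.Int.band (p >>> k.toNat) 1 ≠ 0 then (st.1, st.2 ++ [PySem.Int.band p mask])
      else (st.1 * PySem.Int.band p mask % 1000000007, st.2)) (1, ([] : List Int))
    let b := st.1
    let odds := st.2
    let osz : Int := odds.length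
    if osz = 0 then 0
    else
      let psum := polyB odds 0 odds.length
      let pw0 : Int := if PySem.Int.mod osz 2 ≠ 0 then 1 else PySem.Int.powMod 2 k.toNat 1000000007
      let step : Int := PySem.Int.powMod 4 k.toNat 1000000007
      let r := (PySem.List.pyRange (2 * PySem.Int.floordiv (osz - 1) 2) (-1) (-2)).foldl
        (fun (st : Int × Int) sz =>
          (st.1 + st.2 * PySem.List.pyGetD psum sz 0, st.2 * step % 1000000007)) (0, pw0)
      b * r.1 % 1000000007

-- ===== PRECONDITION & SPEC =====
-- Pre_ excludes exactly the inputs where the Python raises ValueError on a negative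
-- shift count: k ≤ -2 always, and k = -1 unless the first guard returns early (xorpiles ≠ 0).
def Pre_calcbit (piles : List Int) (xorpiles : Int) (k : Int) : Prop :=
  0 ≤ k ∨ (k = -1 ∧ xorpiles ≠ 0)
instance (piles : List Int) (xorpiles : Int) (k : Int) : Decidable (Pre_calcbit piles xorpiles k) := by unfold Pre_calcbit; infer_instance

def pvWitness_calcbit : List Int × Int × Int := ([1, 2, 3], 0, 0)

def Spec_calcbit (piles : List Int) (xorpiles : Int) (k : Int) (out : Int) : Prop := out = calcbit_alt piles xorpiles k
instance (piles : List Int) (xorpiles : Int) (k : Int) (out : Int) : Decidable (Spec_calcbit piles xorpiles k out) := by unfold Spec_calcbit; infer_instance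

-- ===== CLAIM (what is proved, stated in full; the proofs are below) =====
def Claim_equal_calcbit : Prop := ∀ (piles : List Int) (xorpiles : Int) (k : Int), Dom_calcbit piles xorpiles k → Pre_calcbit piles xorpiles k → Spec_calcbit piles xorpiles k (calcbit piles xorpiles k)

-- ===== LEMMAS AND PROOFS =====

-- elementary symmetric polynomial e_j over the integers (no modulus)
def esym : List Int → Nat → Int
  | _, 0 => 1
  | [], _ + 1 => 0
  | a :: l, j + 1 => esym l (j + 1) + a * esym l j

-- the reference value of both psum computations: [e_0 % M, …, e_n % M]
def eList (l : List Int) : List Int :=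
  (List.range (l.length + 1)).map (fun j => esym l j % 1000000007)

theorem esym_zero (l : List Int) : esym l 0 = 1 := by cases l <;> rfl

theorem esym_eq_zero_of_lt (l : List Int) (j : Nat) (h : l.length < j) : esym l j = 0 := by
  induction l generalizing j with
  | nil => cases j with | zero => omega | succ j => rfl
  | cons a l ih =>
    cases j with
    | zero => omega
    | succ j =>
      simp only [esym]
      rw [ih j (by simp at h; omega), ih (j + 1) (by simp at h; omega)]
      ring

theorem esym_append_singleton (l : List Int) (a : Int) (j : Nat) :
    esym (l ++ [a]) (j + 1) = esym l (j + 1) + a * esym l j := by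
  induction l generalizing j with
  | nil => simp [esym]
  | cons b l ih =>
    cases j with
    | zero => simp only [List.cons_append, esym, esym_zero, ih]; ring
    | succ j => simp only [List.cons_append, esym, ih]; ring

theorem esym_append (l1 l2 : List Int) (j : Nat) :
    esym (l1 ++ l2) j = ∑ i ∈ Finset.range (j + 1), esym l1 i * esym l2 (j - i) := by
  induction l1 generalizing j with
  | nil =>
    rw [Finset.sum_range_succ']
    simp [esym]
  | cons a l1 ih =>
    cases j with
    | zero => simp [esym_zero]
    | succ j =>
      simp only [List.cons_append, esym, ih]
      rw [Finset.sum_range_succ' (fun i => esym l1 i * esym l2 (j + 1 - i)) (j + 1),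
          Finset.sum_range_succ' (fun i => esym (a :: l1) i * esym l2 (j + 1 - i)) (j + 1)]
      simp only [Nat.add_sub_add_right, esym, esym_zero, one_mul, Nat.sub_zero]
      rw [show (∑ i ∈ Finset.range (j + 1), (esym l1 (i + 1) + a * esym l1 i) * esym l2 (j - i))
            = (∑ i ∈ Finset.range (j + 1), esym l1 (i + 1) * esym l2 (j - i))
              + a * ∑ i ∈ Finset.range (j + 1), esym l1 i * esym l2 (j - i) by
        rw [Finset.mul_sum, ← Finset.sum_add_distrib]
        exact Finset.sum_congr rfl (fun i _ => by ring)]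
      ring

-- A-side: the row fold computes e_j of the processed prefix, reduced mod M
theorem emod_combine (x y a : Int) :
    (x % 1000000007 + a * (y % 1000000007)) % 1000000007 = (x + a * y) % 1000000007 := by
  conv_rhs => rw [Int.add_emod, Int.mul_emod]
  conv_lhs => rw [Int.add_emod, Int.mul_emod]
  simp [Int.emod_emod_of_dvd]

theorem rowStepA_map (pre : List Int) (a : Int) (n : Nat) (hn : 1 ≤ n) :
    rowStepA a ((List.range n).map (fun j => esym pre j % 1000000007))
      = (List.range n).map (fun j => esym (pre ++ [a]) j % 1000000007) := by
  apply List.ext_getElem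
  · simp [rowStepA]; omega
  · intro i h1 h2
    match i with
    | 0 => simp [rowStepA, esym_zero]
    | i + 1 =>
      simp only [rowStepA, List.getElem_cons_succ, List.getElem_zipWith, List.getElem_drop,
        List.getElem_map, List.getElem_range]
      rw [emod_combine, esym_append_singleton, Nat.add_comm 1 i]

theorem prodsumsA_eq_eList (arr : List Int) : prodsumsA arr = eList arr := by
  have init : (1 : Int) :: List.replicate arr.length 0
      = (List.range (arr.length + 1)).map (fun j => esym ([] : List Int) j % 1000000007) := by
    apply List.ext_getElem
    · simp
    · intro i h1 h2
      match i with
      | 0 => simp [esym]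
      | i + 1 => simp [esym]
  have fold : ∀ (l pre : List Int) (n : Nat), 1 ≤ n →
      l.foldl (fun prev a => rowStepA a prev) ((List.range n).map (fun j => esym pre j % 1000000007))
        = (List.range n).map (fun j => esym (pre ++ l) j % 1000000007) := by
    intro l
    induction l with
    | nil => intro pre n hn; simp
    | cons a l ih =>
      intro pre n hn
      simp only [List.foldl_cons]
      rw [rowStepA_map pre a n hn, ih (pre ++ [a]) n hn]
      simp
  rw [prodsumsA, init, fold arr [] (arr.length + 1) (by omega)]
  simp [eList]

-- B-side: the mod-convolution of two eLists is the eList of the concatenation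
theorem list_sum_range (n : Nat) (f : Nat → Int) :
    ((List.range n).map f).sum = ∑ i ∈ Finset.range n, f i := rfl

theorem eList_length (l : List Int) : (eList l).length = l.length + 1 := by simp [eList]

theorem eList_getD (l : List Int) (i : Nat) (h : i < l.length + 1) :
    (eList l).getD i 0 = esym l i % 1000000007 := by
  rw [List.getD_eq_getElem _ _ (by rw [eList_length]; omega)]
  simp [eList]

theorem eList_getElem (l : List Int) (i : Nat) (h : i < (eList l).length) :
    (eList l)[i] = esym l i % 1000000007 := by simp [eList]

theorem mulmodB_eList (l1 l2 : List Int) : mulmodB (eList l1) (eList l2) = eList (l1 ++ l2) := by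
  unfold mulmodB
  apply List.ext_getElem
  · simp only [List.length_map, List.length_range, eList_length, List.length_append]
    omega
  · intro idx h1 h2
    simp only [List.length_map, List.length_range, eList_length] at h1
    rw [eList_length] at h2
    simp only [List.getElem_map, List.getElem_range]
    rw [eList_getElem (l1 ++ l2) idx (by rw [eList_length]; omega)]
    simp only [eList_length]
    rw [list_sum_range]
    have step1 : ∀ i ∈ Finset.range (l1.length + 1),
        (if i ≤ idx ∧ idx - i < l2.length + 1 then (eList l1).getD i 0 * (eList l2).getD (idx - i) 0 else 0)
        = (if i ≤ idx ∧ idx - i ≤ l2.length then (esym l1 i % 1000000007) * (esym l2 (idx - i) % 1000000007) else 0) := by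
      intro i hi
      rw [Finset.mem_range] at hi
      by_cases h : i ≤ idx ∧ idx - i ≤ l2.length
      · rw [if_pos ⟨h.1, by omega⟩, if_pos h, eList_getD l1 i (by omega), eList_getD l2 (idx - i) (by omega)]
      · rw [if_neg (by omega), if_neg h]
    rw [Finset.sum_congr rfl step1]
    have step2 : (∑ i ∈ Finset.range (l1.length + 1),
        (if i ≤ idx ∧ idx - i ≤ l2.length then (esym l1 i % 1000000007) * (esym l2 (idx - i) % 1000000007) else 0)) % 1000000007
        = (∑ i ∈ Finset.range (l1.length + 1),
        (if i ≤ idx ∧ idx - i ≤ l2.length then esym l1 i * esym l2 (idx - i) else 0)) % 1000000007 := by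
      rw [Finset.sum_int_mod, Finset.sum_int_mod (f := fun i => if i ≤ idx ∧ idx - i ≤ l2.length then esym l1 i * esym l2 (idx - i) else 0)]
      congr 1
      apply Finset.sum_congr rfl
      intro i _
      by_cases h : i ≤ idx ∧ idx - i ≤ l2.length
      · rw [if_pos h, if_pos h, ← Int.mul_emod]
      · rw [if_neg h, if_neg h]
    rw [step2]
    congr 1
    rw [esym_append]
    rcases le_or_gt (l1.length + 1) (idx + 1) with hc | hc
    · rw [← Finset.sum_subset
        (by intro x hx; rw [Finset.mem_range] at *; omega :
          Finset.range (l1.length + 1) ⊆ Finset.range (idx + 1))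
        (by intro i hi hni; simp only [Finset.mem_range] at hi hni;
            rw [esym_eq_zero_of_lt l1 i (by omega), zero_mul])]
      apply Finset.sum_congr rfl
      intro i hi
      rw [Finset.mem_range] at hi
      by_cases h : idx - i ≤ l2.length
      · rw [if_pos ⟨by omega, h⟩]
      · rw [if_neg (by omega), esym_eq_zero_of_lt l2 (idx - i) (by omega), mul_zero]
    · rw [← Finset.sum_subset
        (by intro x hx; rw [Finset.mem_range] at *; omega :
          Finset.range (idx + 1) ⊆ Finset.range (l1.length + 1))
        (by intro i hi hni; simp only [Finset.mem_range] at hi hni; exact if_neg (by omega))]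
      apply Finset.sum_congr rfl
      intro i hi
      rw [Finset.mem_range] at hi
      by_cases h : idx - i ≤ l2.length
      · rw [if_pos ⟨by omega, h⟩]
      · rw [if_neg (by omega), esym_eq_zero_of_lt l2 (idx - i) (by omega), mul_zero]

theorem polyB_eq_eList_aux (n : Nat) : ∀ (arr : List Int) (lo hi : Nat), hi - lo ≤ n →
    lo < hi → hi ≤ arr.length → polyB arr lo hi = eList ((arr.drop lo).take (hi - lo)) := by
  induction n with
  | zero => intro arr lo hi h1 h2 h3; omega
  | succ n ih =>
    intro arr lo hi h1 h2 h3
    rw [polyB]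
    by_cases h : hi ≤ lo + 1
    · rw [dif_pos h]
      have hhi : hi = lo + 1 := by omega
      subst hhi
      have hdrop : arr.drop lo = arr[lo] :: arr.drop (lo + 1) := List.drop_eq_getElem_cons (by omega)
      rw [hdrop]
      simp only [Nat.add_sub_cancel_left, List.take_succ_cons, List.take_zero]
      rw [List.getD_eq_getElem _ _ (by omega)]
      show _ = eList [arr[lo]]
      simp only [eList, List.length_singleton, List.range_succ, List.map_cons,
        List.map_nil, List.map_append]
      norm_num [esym]
      rfl
    · rw [dif_neg h]
      have hm1 : lo < (lo + hi) / 2 := by omega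
      have hm2 : (lo + hi) / 2 < hi := by omega
      rw [ih arr lo ((lo + hi) / 2) (by omega) hm1 (by omega),
          ih arr ((lo + hi) / 2) hi (by omega) hm2 h3,
          mulmodB_eList]
      congr 1
      rw [show hi - lo = ((lo + hi) / 2 - lo) + (hi - (lo + hi) / 2) by omega, List.take_add]
      congr 1
      rw [List.drop_drop]
      congr 1
      congr 1
      omega

theorem polyB_eq_eList (arr : List Int) (lo hi : Nat) (hlo : lo < hi) (hhi : hi ≤ arr.length) :
    polyB arr lo hi = eList ((arr.drop lo).take (hi - lo)) :=
  polyB_eq_eList_aux (hi - lo) arr lo hi le_rfl hlo hhi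

theorem psum_agree (l : List Int) (h : l ≠ []) : prodsumsA l = polyB l 0 l.length := by
  rw [prodsumsA_eq_eList, polyB_eq_eList l 0 l.length (by cases l <;> simp_all) le_rfl]
  simp

-- B's single partition pass equals A's two filter-map passes
theorem pass_fold (kN : Nat) (m : Int) (l : List Int) : ∀ (b0 : Int) (acc : List Int),
    l.foldl (fun (st : Int × List Int) (p : Int) =>
      if PySem.Int.band (p >>> kN) 1 ≠ 0 then (st.1, st.2 ++ [PySem.Int.band p m])
      else (st.1 * PySem.Int.band p m % 1000000007, st.2)) (b0, acc)
    = (((l.filter (fun (p : Int) => PySem.Int.band (p >>> kN) 1 == 0)).map (fun p => PySem.Int.band p m)).foldl (fun b e => b * e % 1000000007) b0,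
       acc ++ (l.filter (fun (p : Int) => PySem.Int.band (p >>> kN) 1 != 0)).map (fun p => PySem.Int.band p m)) := by
  induction l with
  | nil => intro b0 acc; simp
  | cons p l ih =>
    intro b0 acc
    by_cases h : PySem.Int.band (p >>> kN) 1 = 0
    · simp only [List.foldl_cons,
        if_neg (show ¬(PySem.Int.band (p >>> kN) 1 ≠ 0) from fun hc => hc h)]
      rw [ih]
      simp [h]
    · simp only [List.foldl_cons, if_pos h]
      rw [ih]
      simp [h]

-- B keeps the evens product reduced mod M; A multiplies exactly and reduces at the end
theorem foldl_mul_eq (xs : List Int) : ∀ (c : Int), xs.foldl (fun b e => b * e) c = c * xs.prod := by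
  induction xs with
  | nil => intro c; simp
  | cons e xs ih => intro c; simp only [List.foldl_cons, List.prod_cons, ih]; ring

theorem foldl_mulmod (xs : List Int) : ∀ (b0 : Int), b0 % 1000000007 = b0 →
    xs.foldl (fun b e => b * e % 1000000007) b0 = (xs.foldl (fun b e => b * e) b0) % 1000000007 := by
  induction xs with
  | nil => intro b0 hb0; simp [hb0]
  | cons e xs ih =>
    intro b0 hb0
    simp only [List.foldl_cons]
    rw [ih (b0 * e % 1000000007) (by rw [Int.emod_emod_of_dvd _ (dvd_refl (1000000007:Int))])]
    rw [foldl_mul_eq, foldl_mul_eq]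
    conv_lhs => rw [Int.mul_emod]
    conv_rhs => rw [Int.mul_emod]
    simp [Int.emod_emod_of_dvd]

-- B's descending fold with a multiplicatively maintained power: closed form as a sum
theorem bfold (k' : Nat) (g : Int → Int) (n : Nat) : ∀ (c s0 : Int) (e : Nat),
    (((List.range n).map (fun t : Nat => c + (-2) * (t : Int))).foldl
      (fun (st : Int × Int) sz => (st.1 + st.2 * g sz, st.2 * ((4 : Int) ^ k' % 1000000007) % 1000000007))
      (s0, (2 : Int) ^ e % 1000000007)).1
    = s0 + ((List.range n).map (fun t =>
        ((2 : Int) ^ (e + 2 * k' * t) % 1000000007) * g (c + (-2) * (t : Int)))).sum := by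
  induction n with
  | zero => intro c s0 e; simp
  | succ n ih =>
    intro c s0 e
    have hpw : (2 : Int) ^ e % 1000000007 * ((4 : Int) ^ k' % 1000000007) % 1000000007
        = (2 : Int) ^ (e + 2 * k') % 1000000007 := by
      rw [pow_add, show (2 : Int) ^ (2 * k') = 4 ^ k' by rw [pow_mul]; norm_num, ← Int.mul_emod]
    rw [List.range_succ_eq_map, List.map_cons, List.map_cons, List.foldl_cons, List.sum_cons,
        List.map_map, List.map_map]
    rw [show ((fun t : Nat => c + (-2) * (t : Int)) ∘ Nat.succ)
          = (fun t : Nat => (c + -2) + (-2) * (t : Int)) by funext t; simp; ring]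
    rw [hpw, ih]
    rw [show ((fun t : Nat => (2 : Int) ^ (e + 2 * k' * t) % 1000000007 * g (c + (-2) * (t : Int))) ∘ Nat.succ)
          = (fun t : Nat => (2 : Int) ^ ((e + 2 * k') + 2 * k' * t) % 1000000007
              * g ((c + -2) + (-2) * (t : Int))) by
      funext t
      simp only [Function.comp]
      rw [show e + 2 * k' * Nat.succ t = (e + 2 * k') + 2 * k' * t by rw [Nat.succ_eq_add_one]; ring,
          show c + (-2) * ((Nat.succ t : Nat) : Int) = (c + -2) + (-2) * (t : Int) by push_cast; ring]]
    simp only [Nat.cast_zero, mul_zero, add_zero]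
    ring

-- the whole weighted-sum loop of B equals A's loop (k' = k.toNat, oN = number of odds)
theorem s_loop_eq (g : Int → Int) (k : Int) (oN : Nat) (hk : 0 ≤ k) (hoN : 1 ≤ oN) :
    ((PySem.List.pyRange (2 * PySem.Int.floordiv ((oN : Int) - 1) 2) (-1) (-2)).foldl
      (fun (st : Int × Int) sz => (st.1 + st.2 * g sz, st.2 * PySem.Int.powMod 4 k.toNat 1000000007 % 1000000007))
      (0, if PySem.Int.mod (oN : Int) 2 ≠ 0 then 1 else PySem.Int.powMod 2 k.toNat 1000000007)).1
    = (PySem.List.pyRange 0 (oN : Int) 2).foldl (fun s sz =>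
        s + (((1 : Int) <<< (k * ((oN : Int) - sz - 1)).toNat) % 1000000007) * g sz) 0 := by
  obtain ⟨k', rfl⟩ : ∃ k' : Nat, k = (k' : Int) := ⟨k.toNat, by omega⟩
  simp only [Int.toNat_natCast]
  have hmodp : ∀ (a : Int), PySem.Int.mod a 1000000007 = a % 1000000007 :=
    fun a => PySem.Int.mod_eq_emod_of_pos (by norm_num)
  have hmod2 : PySem.Int.mod (oN : Int) 2 = (oN : Int) % 2 :=
    PySem.Int.mod_eq_emod_of_pos (by norm_num)
  have hfd : PySem.Int.floordiv ((oN : Int) - 1) 2 = ((oN : Int) - 1) / 2 :=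
    PySem.Int.floordiv_eq_ediv_of_pos (by norm_num)
  -- the descending range as a mapped List.range
  have hB : PySem.List.pyRange (2 * PySem.Int.floordiv ((oN : Int) - 1) 2) (-1) (-2)
      = (List.range ((((oN : Int) - 1) / 2 + 1).toNat)).map
          (fun t : Nat => 2 * (((oN : Int) - 1) / 2) + (-2) * (t : Int)) := by
    rw [hfd]
    simp only [PySem.List.pyRange]
    rw [if_neg (by norm_num), if_neg (by norm_num), if_pos (by omega)]
    congr 1
    congr 1
    simp only [neg_neg]
    omega
  -- A's range
  have hA : PySem.List.pyRange 0 (oN : Int) 2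
      = (List.range ((((oN : Int) + 1) / 2).toNat)).map (fun t : Nat => 0 + 2 * (t : Int)) := by
    rw [PySem.List.pyRange_of_pos _ _ (by norm_num)]
    rw [if_pos (by omega)]
    congr 1
    congr 1
    omega
  -- A's fold as a sum
  rw [hA, PySem.List.foldl_add, hB]
  -- B's initial power as 2^e0 % M
  -- choose e0 by parity
  rcases Int.emod_two_eq (oN : Int) with hpar | hpar
  · -- oN even: pw0 = 2^k' % M
    have hif : (if PySem.Int.mod (oN : Int) 2 ≠ 0 then (1 : Int) else PySem.Int.powMod 2 k' 1000000007)
        = (2 : Int) ^ k' % 1000000007 := by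
      rw [hmod2, if_neg (by omega), PySem.Int.powMod, hmodp]
    rw [hif, show PySem.Int.powMod 4 k' 1000000007 = (4 : Int) ^ k' % 1000000007 by
      rw [PySem.Int.powMod, hmodp], bfold]
    rw [zero_add, zero_add]
    rw [show ((List.range ((((oN : Int) - 1) / 2 + 1).toNat)).map (fun t : Nat =>
          (2 : Int) ^ (k' + 2 * k' * t) % 1000000007
            * g (2 * (((oN : Int) - 1) / 2) + (-2) * (t : Int))))
        = ((List.range ((((oN : Int) + 1) / 2).toNat)).map (fun sz : Nat =>
            ((1 : Int) <<< (((k' : Int)) * ((oN : Int) - (0 + 2 * (sz : Int)) - 1)).toNat % 1000000007)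
              * g (0 + 2 * (sz : Int)))).reverse from ?_, List.sum_reverse, List.map_map]
    case _ => rfl
    apply List.ext_getElem
    · simp only [List.length_map, List.length_range, List.length_reverse]
      omega
    · intro i h1 h2
      simp only [List.length_map, List.length_range] at h1 h2
      rw [List.getElem_reverse]
      simp only [List.getElem_map, List.getElem_range, List.length_map, List.length_range]
      have harg : 2 * (((oN : Int) - 1) / 2) + (-2) * (i : Int)
          = 0 + 2 * ((((((oN : Int) + 1) / 2).toNat - 1 - i : Nat)) : Int) := by
        omega
      have hexp : ((k' : Int) * ((oN : Int)
            - (0 + 2 * ((((((oN : Int) + 1) / 2).toNat - 1 - i : Nat)) : Int)) - 1)).toNat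
          = k' + 2 * k' * i := by
        rw [show (oN : Int) - (0 + 2 * ((((((oN : Int) + 1) / 2).toNat - 1 - i : Nat)) : Int)) - 1
              = ((2 * i + 1 : Nat) : Int) by push_cast; omega]
        rw [← Nat.cast_mul, Int.toNat_natCast]
        ring
      rw [harg, hexp, Int.shiftLeft_eq, one_mul]
  · -- oN odd: pw0 = 1 = 2^0 % M
    have hif : (if PySem.Int.mod (oN : Int) 2 ≠ 0 then (1 : Int) else PySem.Int.powMod 2 k' 1000000007)
        = (2 : Int) ^ 0 % 1000000007 := by
      rw [hmod2, if_pos (by omega)]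
      norm_num
    rw [hif, show PySem.Int.powMod 4 k' 1000000007 = (4 : Int) ^ k' % 1000000007 by
      rw [PySem.Int.powMod, hmodp], bfold]
    rw [zero_add, zero_add]
    rw [show ((List.range ((((oN : Int) - 1) / 2 + 1).toNat)).map (fun t : Nat =>
          (2 : Int) ^ (0 + 2 * k' * t) % 1000000007
            * g (2 * (((oN : Int) - 1) / 2) + (-2) * (t : Int))))
        = ((List.range ((((oN : Int) + 1) / 2).toNat)).map (fun sz : Nat =>
            ((1 : Int) <<< (((k' : Int)) * ((oN : Int) - (0 + 2 * (sz : Int)) - 1)).toNat % 1000000007)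
              * g (0 + 2 * (sz : Int)))).reverse from ?_, List.sum_reverse, List.map_map]
    case _ => rfl
    apply List.ext_getElem
    · simp only [List.length_map, List.length_range, List.length_reverse]
      omega
    · intro i h1 h2
      simp only [List.length_map, List.length_range] at h1 h2
      rw [List.getElem_reverse]
      simp only [List.getElem_map, List.getElem_range, List.length_map, List.length_range]
      have harg : 2 * (((oN : Int) - 1) / 2) + (-2) * (i : Int)
          = 0 + 2 * ((((((oN : Int) + 1) / 2).toNat - 1 - i : Nat)) : Int) := by
        omega
      have hexp : ((k' : Int) * ((oN : Int)
            - (0 + 2 * ((((((oN : Int) + 1) / 2).toNat - 1 - i : Nat)) : Int)) - 1)).toNat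
          = 0 + 2 * k' * i := by
        rw [show (oN : Int) - (0 + 2 * ((((((oN : Int) + 1) / 2).toNat - 1 - i : Nat)) : Int)) - 1
              = ((2 * i : Nat) : Int) by push_cast; omega]
        rw [← Nat.cast_mul, Int.toNat_natCast]
        ring
      rw [harg, hexp, Int.shiftLeft_eq, one_mul]

-- ===== VERDICT (by name: the statement is the Claim_ definition above) =====
theorem calcbit_spec : Claim_equal_calcbit := by
  intro piles xorpiles k _ hpre
  unfold Spec_calcbit calcbit calcbit_alt
  by_cases h1 : xorpiles >>> (k + 1).toNat ≠ 0
  · rw [if_pos h1, if_pos h1]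
  · rw [if_neg h1, if_neg h1]
    have hk : 0 ≤ k := by
      rcases hpre with hk | ⟨hk, hx⟩
      · exact hk
      · exfalso; apply h1; subst hk; simpa using hx
    simp only []
    rw [pass_fold]
    simp only [List.nil_append]
    set odds := (piles.filter (fun (p : Int) => PySem.Int.band (p >>> k.toNat) 1 != 0)).map
      (fun p => PySem.Int.band p (((1 : Int) <<< k.toNat) - 1)) with hodds
    by_cases h2 : (odds.length : Int) = 0
    · rw [if_pos h2, if_pos h2]
    · rw [if_neg h2, if_neg h2]
      have hnil : odds ≠ [] := by
        intro h; rw [h] at h2; simp at h2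
      have hlen : 1 ≤ odds.length := List.length_pos_of_ne_nil hnil
      rw [psum_agree odds hnil, foldl_mulmod _ 1 (by norm_num)]
      have hmul : ∀ (a s : Int), a * s % 1000000007 = a % 1000000007 * s % 1000000007 := by
        intro a s
        conv_lhs => rw [Int.mul_emod]
        conv_rhs => rw [Int.mul_emod]
        rw [Int.emod_emod_of_dvd _ (dvd_refl (1000000007:Int))]
      rw [hmul]
      congr 1
      congr 1
      exact (s_loop_eq (fun sz => PySem.List.pyGetD (polyB odds 0 odds.length) sz 0) k odds.length hk hlen).symm
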